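-- pv_equiv track=rewrite | github.com/chenqh19/game | example_player.py | _cal_betting_sequence
-- ===== SOURCE A (Python) =====
-- def _cal_betting_sequence(betting_string):
--     betting_sequence = list()
--     for x in betting_string.split("/"):
--         sequence = list()
--         s = 0
--         while s < len(x):
--             if x[s] == 'c' or x[s] == 'f':
--                 sequence.append(x[s])
--                 s += 1
--             else:
--                 e = s + 1
--                 while e < len(x) and \
--                         (x[e] != 'c' and x[e] != 'f' and x[e] != 'r'):
--                     e += 1
--                 sequence.append(x[s:e])
--                 s = e
--         betting_sequence.append(sequence)
--     return betting_sequence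
-- ===== SOURCE B (Python) =====
-- def _cal_betting_sequence(betting_string):
--     rounds = []
--     for seg in betting_string.split("/"):
--         toks = []
--         cur = ""
--         for ch in seg:
--             if ch == 'c' or ch == 'f':
--                 if cur:
--                     toks.append(cur)
--                 cur = ""
--                 toks.append(ch)
--             elif ch == 'r' or not cur:
--                 if cur:
--                     toks.append(cur)
--                 cur = ch
--             else:
--                 cur += ch
--         if cur:
--             toks.append(cur)
--         rounds.append(toks)
--     return rounds
-- ===== Notes on version B (the rewrite author's own statement) =====
-- stated objective: alternative
-- what changed: A's per-segment two-pointer tokenizer (outer while over s with a nested while scanning ahead to find the end e of each raise token, then slicing x[s:e]) is replaced by a single left-to-right pass per segment that keeps a current raise-token buffer and flushes it when a 'c'/'f'/'r' boundary is reached — no index arithmetic, no nested scan, no slicing.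
import Mathlib
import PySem

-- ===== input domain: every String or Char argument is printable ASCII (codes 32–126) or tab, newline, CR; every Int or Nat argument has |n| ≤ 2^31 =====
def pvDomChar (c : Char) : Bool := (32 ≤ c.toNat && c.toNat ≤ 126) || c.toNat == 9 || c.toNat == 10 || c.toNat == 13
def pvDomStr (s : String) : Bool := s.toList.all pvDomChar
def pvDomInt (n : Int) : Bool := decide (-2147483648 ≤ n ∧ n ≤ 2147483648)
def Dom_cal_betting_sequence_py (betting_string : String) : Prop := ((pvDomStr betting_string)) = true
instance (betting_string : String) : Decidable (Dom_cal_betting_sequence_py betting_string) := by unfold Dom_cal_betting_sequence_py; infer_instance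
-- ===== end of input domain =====

-- B replaces A's two-pointer nested while-loops with a single left-to-right pass per segment
-- that maintains a current raise-token buffer (objective: alternative one-pass decomposition).


-- ===== PORT A =====
-- inner while of A: advance e while x[e] is none of 'c','f','r'
def pvFindE (xs : List Char) (e : Nat) : Nat :=
  if h : e < xs.length then
    if xs[e] ≠ 'c' ∧ xs[e] ≠ 'f' ∧ xs[e] ≠ 'r' then pvFindE xs (e + 1) else e
  else e
termination_by xs.length - e

-- cited by pvTokA's decreasing_by (the outer while advances: s < pvFindE xs (s+1))
theorem pvFindE_le (xs : List Char) (e : Nat) : e ≤ pvFindE xs e := by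
  unfold pvFindE
  split
  · split
    · exact le_trans (Nat.le_succ e) (pvFindE_le xs (e + 1))
    · exact le_refl e
  · exact le_refl e
termination_by xs.length - e

-- outer while of A over index s
def pvTokA (xs : List Char) (s : Nat) : List String :=
  if h : s < xs.length then
    if xs[s] = 'c' ∨ xs[s] = 'f' then
      String.ofList [xs[s]] :: pvTokA xs (s + 1)
    else
      String.ofList (PySem.List.slice xs (some (s : Int)) (some ((pvFindE xs (s + 1) : Nat) : Int)))
        :: pvTokA xs (pvFindE xs (s + 1))
  else []
termination_by xs.length - s
decreasing_by
  · omega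
  · have := pvFindE_le xs (s + 1); omega

def cal_betting_sequence_py (betting_string : String) : List (List String) :=
  (PySem.Chars.splitOn betting_string.toList ['/']).map (fun x => pvTokA x 0)

-- ===== PORT B =====
-- one step of B's single pass: state = (finished tokens, current raise-token buffer)
def pvStepB (st : List String × List Char) (ch : Char) : List String × List Char :=
  match st with
  | (toks, cur) =>
    if ch = 'c' ∨ ch = 'f' then
      ((if cur = [] then toks else toks ++ [String.ofList cur]) ++ [String.ofList [ch]], [])
    else if ch = 'r' ∨ cur = [] then
      ((if cur = [] then toks else toks ++ [String.ofList cur]), [ch])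
    else (toks, cur ++ [ch])

def pvTokB (seg : List Char) : List String :=
  match seg.foldl pvStepB ([], []) with
  | (toks, cur) => if cur = [] then toks else toks ++ [String.ofList cur]

def cal_betting_sequence_py_alt (betting_string : String) : List (List String) :=
  (PySem.Chars.splitOn betting_string.toList ['/']).map (fun x => pvTokB x)

-- ===== PRECONDITION & SPEC =====
def Spec_cal_betting_sequence_py (betting_string : String) (out : List (List String)) : Prop := out = cal_betting_sequence_py_alt betting_string
instance (betting_string : String) (out : List (List String)) : Decidable (Spec_cal_betting_sequence_py betting_string out) := by unfold Spec_cal_betting_sequence_py; infer_instance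

-- ===== CLAIM (what is proved, stated in full; the proofs are below) =====
def Claim_equal_cal_betting_sequence_py : Prop := ∀ (betting_string : String), Dom_cal_betting_sequence_py betting_string → Spec_cal_betting_sequence_py betting_string (cal_betting_sequence_py betting_string)

-- ===== LEMMAS AND PROOFS =====

-- reference tokenizer: 'c'/'f' are single tokens; any other char starts a token
-- extending over the following chars that are none of 'c','f','r'
def pvCont (c : Char) : Bool := !(c = 'c' || c = 'f' || c = 'r')

def pvTok : List Char → List String
  | [] => []
  | c :: rest =>
    if c = 'c' ∨ c = 'f' then String.ofList [c] :: pvTok rest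
    else String.ofList (c :: rest.takeWhile pvCont) :: pvTok (rest.dropWhile pvCont)
termination_by xs => xs.length
decreasing_by
  · simp
  · have := List.length_dropWhile_le pvCont rest; simp; omega

theorem pvFindE_eq (xs : List Char) (e : Nat) :
    pvFindE xs e = e + ((xs.drop e).takeWhile pvCont).length := by
  unfold pvFindE
  split
  · rename_i h
    rw [List.drop_eq_getElem_cons h]
    split
    · rename_i hc
      have hp : pvCont xs[e] = true := by simp [pvCont]; tauto
      rw [List.takeWhile_cons_of_pos hp]
      rw [pvFindE_eq xs (e + 1)]
      simp
      omega
    · rename_i hc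
      have hp : pvCont xs[e] = false := by
        simp [pvCont]
        tauto
      rw [List.takeWhile_cons_of_neg (by simp [hp])]
      simp
  · rename_i h
    rw [List.drop_eq_nil_of_le (by omega)]
    simp
termination_by xs.length - e

theorem pvTokA_eq (xs : List Char) (s : Nat) : pvTokA xs s = pvTok (xs.drop s) := by
  unfold pvTokA
  split
  · rename_i h
    rw [List.drop_eq_getElem_cons h, pvTok]
    split
    · rename_i hc
      rw [pvTokA_eq xs (s + 1)]
    · rename_i hc
      have he := pvFindE_eq xs (s + 1)
      set L := ((xs.drop (s + 1)).takeWhile pvCont).length with hL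
      congr 1
      · congr 1
        rw [he]
        rw [show ((s + 1 + L : Nat) : Int) = (s : Int) + ((1 + L : Nat) : Int) from by push_cast; ring]
        rw [PySem.List.slice_natCast_add]
        rw [List.drop_eq_getElem_cons h]
        rw [show 1 + L = L + 1 from by omega, List.take_succ_cons]
        congr 1
        have hpref : (xs.drop (s + 1)).takeWhile pvCont <+: xs.drop (s + 1) :=
          List.takeWhile_prefix pvCont
        rw [List.prefix_iff_eq_take] at hpref
        exact hpref.symm
      · rw [pvTokA_eq xs (pvFindE xs (s + 1)), he]
        congr 1
        rw [← List.drop_drop]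
        conv_lhs => rw [← List.takeWhile_append_dropWhile (p := pvCont) (l := xs.drop (s + 1))]
        exact List.drop_left' hL.symm
  · rename_i h
    rw [List.drop_eq_nil_of_le (by omega), pvTok]
termination_by xs.length - s
decreasing_by
  · omega
  · have := pvFindE_le xs (s + 1); omega

-- finishing step of B's pass (proof-side helper)
def pvTokB_fin (st : List String × List Char) : List String :=
  match st with
  | (toks, cur) => if cur = [] then toks else toks ++ [String.ofList cur]

-- B's loop invariant, for an empty and a nonempty current buffer at once
theorem pvStepB_loop (seg : List Char) :
    (∀ toks : List String,
      pvTokB_fin (seg.foldl pvStepB (toks, [])) = toks ++ pvTok seg) ∧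
    (∀ (toks : List String) (cur : List Char), cur ≠ [] →
      pvTokB_fin (seg.foldl pvStepB (toks, cur)) =
        toks ++ [String.ofList (cur ++ seg.takeWhile pvCont)] ++ pvTok (seg.dropWhile pvCont)) := by
  induction seg with
  | nil =>
    constructor
    · intro toks; simp [pvTokB_fin, pvTok]
    · intro toks cur hcur; simp [pvTokB_fin, pvTok, hcur]
  | cons ch rest ih =>
    constructor
    · intro toks
      simp only [List.foldl_cons]
      rw [pvStepB]
      by_cases h1 : ch = 'c' ∨ ch = 'f'
      · rw [if_pos h1]
        simp only [if_true]
        rw [ih.1, pvTok, if_pos h1]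
        simp
      · rw [if_neg h1, if_pos (Or.inr rfl)]
        simp only [if_true]
        rw [ih.2 toks [ch] (by simp), pvTok, if_neg h1]
        simp
    · intro toks cur hcur
      simp only [List.foldl_cons]
      rw [pvStepB]
      by_cases h1 : ch = 'c' ∨ ch = 'f'
      · rw [if_pos h1]
        rw [if_neg hcur]
        rw [ih.1]
        have hp : pvCont ch = false := by rcases h1 with h | h <;> simp [pvCont, h]
        rw [List.takeWhile_cons_of_neg (by simp [hp]), List.dropWhile_cons_of_neg (by simp [hp])]
        rw [pvTok, if_pos h1]
        simp
      · rw [if_neg h1]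
        by_cases h2 : ch = 'r'
        · rw [if_pos (Or.inl h2), if_neg hcur]
          rw [ih.2 _ [ch] (by simp)]
          have hp : pvCont ch = false := by simp [pvCont, h2]
          rw [List.takeWhile_cons_of_neg (by simp [hp]), List.dropWhile_cons_of_neg (by simp [hp])]
          rw [pvTok, if_neg h1]
          simp
        · rw [if_neg (by tauto)]
          rw [ih.2 _ (cur ++ [ch]) (by simp)]
          have hp : pvCont ch = true := by
            simp [pvCont]
            tauto
          rw [List.takeWhile_cons_of_pos hp, List.dropWhile_cons_of_pos hp]
          simp

theorem pvTokB_eq (seg : List Char) : pvTokB seg = pvTok seg := by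
  have h := (pvStepB_loop seg).1 []
  have hfin : pvTokB seg = pvTokB_fin (seg.foldl pvStepB ([], [])) := by
    cases hh : seg.foldl pvStepB ([], []) with
    | mk t c => simp [pvTokB, pvTokB_fin, hh]
  rw [hfin, h]
  simp

-- ===== VERDICT (by name: the statement is the Claim_ definition above) =====
theorem cal_betting_sequence_py_spec : Claim_equal_cal_betting_sequence_py := by
  intro s _
  unfold Spec_cal_betting_sequence_py cal_betting_sequence_py cal_betting_sequence_py_alt
  refine List.map_congr_left (fun x _ => ?_)
  rw [pvTokA_eq, pvTokB_eq, List.drop_zero]
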